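-- pv_equiv track=rewrite | github.com/MrBrantCode/unitest_baseline | mut_generate/mist_train_taco/taco_5783/solution.py | count_11_sequences
-- ===== SOURCE A (Python) =====
-- def count_11_sequences(number_str: str) -> int:
--     m = len(number_str)
--     if number_str == '0':
--         return 0
--
--     dp = [[0 for j in range(11)] for i in range(m)]
--
--     for i in range(m):
--         n = int(number_str[i])
--         if n == 0:
--             tmp = dp[i - 1][1:]
--             tmp.reverse()
--             dp[i] = [dp[i - 1][0]] + tmp
--         else:
--             tmp = dp[i - 1][1:]
--             tmp.reverse()
--             tmp = [dp[i - 1][0]] + tmp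
--             dp[i] = tmp[-n:] + tmp[:-n]
--             dp[i][n] += 1
--
--     ans = 0
--     for i in range(m):
--         ans += dp[i][0]
--
--     return ans
-- ===== SOURCE B (Python) =====
-- def count_11_sequences(number_str: str) -> int:
--     # Pair-counting via prefix alternating sums: since 10 = -1 (mod 11), the
--     # substring s[l..r] is divisible by 11 iff the alternating prefix sums at
--     # l and r+1 agree mod 11.  Count, for each position, how many earlier
--     # non-'0' start positions share its prefix value, using one counter array.
--     counts = [0] * 11
--     p = 0          # alternating prefix sum mod 11 at the current position
--     sign = 1
--     ans = 0
--     for ch in number_str: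
--         d = int(ch)
--         if ch != '0':
--             counts[p] += 1        # register this index as a legal start l
--         p = (p + sign * d) % 11   # prefix value after consuming the digit
--         sign = -sign
--         ans += counts[p]          # substrings ending here and divisible by 11
--     return ans
-- ===== Notes on version B (the rewrite author's own statement) =====
-- stated objective: alternative
-- what changed: Replaces A's per-position remainder DP (an m x 11 table updated by reverse+prepend+slice-rotation) with pair-counting over prefix alternating sums: since 10 = -1 mod 11 a substring is divisible by 11 iff its two bounding prefix alternating sums agree mod 11, so B keeps one counter array of prefix values at legal (non-'0') start positions and adds a counter lookup per digit.
import Mathlib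
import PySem

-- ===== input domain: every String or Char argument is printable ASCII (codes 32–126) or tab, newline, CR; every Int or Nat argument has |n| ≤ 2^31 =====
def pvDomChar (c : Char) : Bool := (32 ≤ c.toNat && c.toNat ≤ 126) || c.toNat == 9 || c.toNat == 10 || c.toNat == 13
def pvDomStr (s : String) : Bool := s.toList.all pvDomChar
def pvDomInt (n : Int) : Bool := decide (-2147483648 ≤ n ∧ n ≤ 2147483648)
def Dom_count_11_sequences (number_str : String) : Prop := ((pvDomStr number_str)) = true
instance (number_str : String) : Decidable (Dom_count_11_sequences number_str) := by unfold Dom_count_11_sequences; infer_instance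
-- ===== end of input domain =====

-- B replaces A's per-position remainder DP table by pair-counting of equal prefix
-- alternating sums mod 11 with a single counter array (objective: alternative algorithm).

-- ===== PORT A =====
-- int(number_str[i]) for a single character (total form; Pre_ restricts to digits, where ofStr? = some)
def pvDigitVal (c : Char) : Int := (PySem.Int.ofStr? (String.singleton c)).getD 0

-- the body of A's dp loop for one row: tmp = dp[i-1][1:]; tmp.reverse(); … (prev = dp[i-1])
def pvARow (prev : List Int) (n : Int) : List Int :=
  if n == 0 then
    let tmp := (PySem.List.slice prev (some 1) none).reverse
    [PySem.List.pyGetD prev 0 0] ++ tmp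
  else
    let tmp := (PySem.List.slice prev (some 1) none).reverse
    let tmp := [PySem.List.pyGetD prev 0 0] ++ tmp
    let row := PySem.List.slice tmp (some (-n)) none ++ PySem.List.slice tmp none (some (-n))
    PySem.List.pySetD row n (PySem.List.pyGetD row n 0 + 1)

def count_11_sequences (number_str : String) : Int :=
  let m : Int := PySem.Str.len number_str
  if number_str == "0" then 0
  else
    let dp : List (List Int) :=
      (PySem.List.pyRange 0 m 1).map (fun _ => (PySem.List.pyRange 0 11 1).map (fun _ => (0:Int)))
    let dp := (PySem.List.pyRange 0 m 1).foldl
      (fun dp i =>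
        let n : Int := pvDigitVal ((PySem.Str.pyGet? number_str i).getD ' ')
        PySem.List.pySetD dp i (pvARow (PySem.List.pyGetD dp (i - 1) []) n)) dp
    (PySem.List.pyRange 0 m 1).foldl
      (fun ans i => ans + PySem.List.pyGetD (PySem.List.pyGetD dp i []) 0 0) 0

-- ===== PORT B =====
-- state (counts, p, sign, ans): counter of prefix alternating sums at non-'0' starts,
-- current prefix value mod 11, current sign (-1)^k, running answer
def count_11_sequences_alt (number_str : String) : Int :=
  (number_str.toList.foldl
    (fun (st : List Int × Int × Int × Int) ch =>
      let d : Int := pvDigitVal ch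
      let counts := if ch ≠ '0' then PySem.List.pySetD st.1 st.2.1 (PySem.List.pyGetD st.1 st.2.1 0 + 1) else st.1
      let p := PySem.Int.mod (st.2.1 + st.2.2.1 * d) 11
      (counts, p, -st.2.2.1, st.2.2.2 + PySem.List.pyGetD counts p 0))
    (List.replicate 11 0, 0, 1, 0)).2.2.2

-- ===== PRECONDITION & SPEC =====
-- Pre_: every character is an ASCII digit — exactly the inputs where int(number_str[i]) never raises ValueError.
def Pre_count_11_sequences (number_str : String) : Prop :=
  number_str.toList.all Char.isDigit = true
instance (number_str : String) : Decidable (Pre_count_11_sequences number_str) := by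
  unfold Pre_count_11_sequences; infer_instance

def pvWitness_count_11_sequences : String := "1215"

def Spec_count_11_sequences (number_str : String) (out : Int) : Prop := out = count_11_sequences_alt number_str
instance (number_str : String) (out : Int) : Decidable (Spec_count_11_sequences number_str out) := by unfold Spec_count_11_sequences; infer_instance

-- ===== CLAIM (what is proved, stated in full; the proofs are below) =====
def Claim_equal_count_11_sequences : Prop := ∀ (number_str : String), Dom_count_11_sequences number_str → Pre_count_11_sequences number_str → Spec_count_11_sequences number_str (count_11_sequences number_str)

-- ===== LEMMAS AND PROOFS =====

theorem pv_digit_cases (c : Char) (h : c.isDigit = true) :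
    c = '0' ∨ c = '1' ∨ c = '2' ∨ c = '3' ∨ c = '4' ∨ c = '5' ∨ c = '6' ∨ c = '7' ∨ c = '8' ∨ c = '9' := by
  simp [Char.isDigit] at h
  obtain ⟨h1, h2⟩ := h
  have h3 : c = Char.ofNat c.toNat := (Char.ofNat_toNat c).symm
  obtain ⟨k, h1, h2, hk⟩ : ∃ k : Nat, 48 ≤ k ∧ k ≤ 57 ∧ c.toNat = k := ⟨c.toNat, h1, h2, rfl⟩
  rw [hk] at h3
  interval_cases k <;> (rw [h3]; decide)

theorem pv_digit_bounds (c : Char) (h : c.isDigit = true) :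
    0 ≤ pvDigitVal c ∧ pvDigitVal c < 10 := by
  rcases pv_digit_cases c h with rfl|rfl|rfl|rfl|rfl|rfl|rfl|rfl|rfl|rfl <;> decide

theorem pv_digit_zero_iff (c : Char) (h : c.isDigit = true) :
    (c ≠ '0') ↔ pvDigitVal c ≠ 0 := by
  rcases pv_digit_cases c h with rfl|rfl|rfl|rfl|rfl|rfl|rfl|rfl|rfl|rfl <;> decide

-- proof-side intermediate: the straightforward ending-remainder step (A's row rewritten
-- as an explicit modular recurrence), used only to characterise both programs
def pvBStep (n : Int) (cur : List Int) : List Int :=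
  let cur' := (PySem.List.pyRange 0 11 1).map
    (fun j => PySem.List.pyGetD cur (PySem.Int.mod (n - j) 11) 0)
  if n ≠ 0 then PySem.List.pySetD cur' n (PySem.List.pyGetD cur' n 0 + 1) else cur'

set_option maxHeartbeats 1000000 in
theorem pv_step_eq (p : List Int) (hp : p.length = 11) (n : Int) (h0 : 0 ≤ n) (h1 : n < 10) :
    pvARow p n = pvBStep n p := by
  obtain ⟨a0,a1,a2,a3,a4,a5,a6,a7,a8,a9,a10,rest,rfl⟩ :
      ∃ a0 a1 a2 a3 a4 a5 a6 a7 a8 a9 a10 rest, p = a0::a1::a2::a3::a4::a5::a6::a7::a8::a9::a10::rest := by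
    match p, hp with
    | [a0,a1,a2,a3,a4,a5,a6,a7,a8,a9,a10], _ => exact ⟨a0,a1,a2,a3,a4,a5,a6,a7,a8,a9,a10,[],rfl⟩
  have hrest : rest = [] := by simpa using hp
  subst hrest
  interval_cases n <;>
    simp [pvARow, pvBStep, PySem.List.slice, PySem.List.pySetD, PySem.List.pyGetD,
          PySem.List.pyRange, PySem.Int.mod, PySem.List.pyGet?, PySem.List.pySet?,
          PySem.List.pyIdx?, PySem.List.clampIdx, List.range_succ]

theorem pv_bStep_len (n : Int) (cur : List Int) : (pvBStep n cur).length = 11 := by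
  unfold pvBStep
  split <;> simp [PySem.List.length_pySetD]

-- rows L k : the ending-remainder vector after the first k digits of L
def pvRows (L : List Char) : Nat → List Int
  | 0 => List.replicate 11 0
  | k + 1 => pvBStep (pvDigitVal (L.getD k ' ')) (pvRows L k)

theorem pvRows_len (L : List Char) (k : Nat) : (pvRows L k).length = 11 := by
  cases k with
  | zero => simp [pvRows]
  | succ k => simp [pvRows, pv_bStep_len]

theorem pvRows_append (M : List Char) (c : Char) :
    ∀ k, k ≤ M.length → pvRows (M ++ [c]) k = pvRows M k := by
  intro k
  induction k with
  | zero => intro _; rfl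
  | succ k ih =>
    intro hk
    have hk' : k < M.length := by omega
    simp only [pvRows, ih (by omega)]
    congr 1
    rw [List.getD_eq_getElem?_getD, List.getD_eq_getElem?_getD,
        List.getElem?_append_left hk']

theorem pvRows_snoc (M : List Char) (c : Char) :
    pvRows (M ++ [c]) (M.length + 1) = pvBStep (pvDigitVal c) (pvRows M M.length) := by
  simp only [pvRows, pvRows_append M c M.length le_rfl]
  congr 1
  rw [List.getD_eq_getElem?_getD]
  simp

-- the ending-remainder loop with a running sum of the divisible bucket
def pvStepOld (st : List Int × Int) (ch : Char) : List Int × Int :=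
  let cur := pvBStep (pvDigitVal ch) st.1
  (cur, st.2 + PySem.List.pyGetD cur 0 0)

set_option maxHeartbeats 2000000 in
theorem loopOld (L : List Char) :
    L.foldl pvStepOld (List.replicate 11 0, 0)
    = (pvRows L L.length,
       ((List.range L.length).map (fun k => (pvRows L (k + 1)).getD 0 0)).sum) := by
  induction L using List.reverseRecOn with
  | nil => simp [pvRows]
  | append_singleton M c ih =>
    rw [List.foldl_append, ih]
    simp only [List.foldl_cons, List.foldl_nil, List.length_append, List.length_singleton, pvStepOld]
    rw [pvRows_snoc]
    refine Prod.ext rfl ?_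
    simp only
    rw [List.range_succ, List.map_append, List.sum_append]
    congr 1
    · apply congrArg
      apply List.map_congr_left
      intro k hk
      rw [pvRows_append M c (k + 1) (by simpa using List.mem_range.mp hk)]
    · rw [List.map_singleton, List.sum_singleton, pvRows_snoc, PySem.List.pyGetD_zero]

-- B's loop body as a named function (definitionally the lambda in the port)
def pvStepB (st : List Int × Int × Int × Int) (ch : Char) : List Int × Int × Int × Int :=
  let d : Int := pvDigitVal ch
  let counts := if ch ≠ '0' then PySem.List.pySetD st.1 st.2.1 (PySem.List.pyGetD st.1 st.2.1 0 + 1) else st.1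
  let p := PySem.Int.mod (st.2.1 + st.2.2.1 * d) 11
  (counts, p, -st.2.2.1, st.2.2.2 + PySem.List.pyGetD counts p 0)

theorem alt_eq_foldl (s : String) :
    count_11_sequences_alt s = (s.toList.foldl pvStepB (List.replicate 11 0, 0, 1, 0)).2.2.2 := rfl

-- the coupled invariant: B's counter of prefix values determines A's ending-remainder row
def pvInv (cur counts : List Int) (p s : Int) : Prop :=
  cur.length = 11 ∧ counts.length = 11 ∧ 0 ≤ p ∧ p < 11 ∧ (s = 1 ∨ s = -1) ∧
  ∀ j : Nat, j < 11 → PySem.List.pyGetD cur (j : Int) 0 =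
    PySem.List.pyGetD counts (PySem.Int.mod (p + s * (j : Int)) 11) 0

theorem pyGetD_pySetD_int (xs : List Int) (i k v : Int)
    (hi0 : 0 ≤ i) (hi : i < (xs.length : Int)) (hk0 : 0 ≤ k) (_hk : k < (xs.length : Int)) :
    PySem.List.pyGetD (PySem.List.pySetD xs i v) k 0 = if k = i then v else PySem.List.pyGetD xs k 0 := by
  have hi' : i = ((i.toNat : Nat) : Int) := by omega
  have hk' : k = ((k.toNat : Nat) : Int) := by omega
  rw [hi', hk', PySem.List.pyGetD_pySetD_natCast xs i.toNat k.toNat v 0 (by omega)]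
  by_cases h : k.toNat = i.toNat
  · rw [if_pos h, if_pos (by omega)]
  · rw [if_neg h, if_neg (by omega)]

theorem pv_step_inv (cur counts : List Int) (p s d : Int)
    (h : pvInv cur counts p s) (hd0 : 0 ≤ d) (hd1 : d < 10) :
    pvInv (pvBStep d cur)
      (if d ≠ 0 then PySem.List.pySetD counts p (PySem.List.pyGetD counts p 0 + 1) else counts)
      (PySem.Int.mod (p + s * d) 11) (-s) := by
  obtain ⟨hc, hk, hp0, hp1, hs, hj⟩ := h
  have h11 : (0:Int) < 11 := by norm_num
  have hmod : ∀ x : Int, PySem.Int.mod x 11 = x % 11 := fun x => PySem.Int.mod_eq_emod_of_pos h11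
  refine ⟨pv_bStep_len d cur, ?_, ?_, ?_, ?_, ?_⟩
  · split <;> simp [PySem.List.length_pySetD, hk]
  · rw [hmod]; exact Int.emod_nonneg _ (by norm_num)
  · rw [hmod]; exact Int.emod_lt_of_pos _ h11
  · rcases hs with rfl | rfl
    · right; rfl
    · left; norm_num
  · intro j hjlt
    have hbase : ∀ i : Int, 0 ≤ i → i < 11 →
        PySem.List.pyGetD ((PySem.List.pyRange 0 11 1).map
          (fun t => PySem.List.pyGetD cur ((d - t) % 11) 0)) i 0
        = PySem.List.pyGetD counts ((p + s * ((d - i) % 11)) % 11) 0 := by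
      intro i h0 h1
      rw [PySem.List.pyGetD_map_pyRange_of_nonneg _ 11 _ _ h0 h1]
      have hq0' : (0:Int) ≤ (d - i) % 11 := Int.emod_nonneg _ (by norm_num)
      have hq1' : (d - i) % 11 < 11 := Int.emod_lt_of_pos _ h11
      have := hj ((d - i) % 11).toNat (by omega)
      rw [hmod, Int.toNat_of_nonneg hq0'] at this
      exact this
    have hblen : ((PySem.List.pyRange 0 11 1).map
        (fun t => PySem.List.pyGetD cur ((d - t) % 11) 0)).length = 11 := by
      simp [PySem.List.length_pyRange_one]
    have hj0 : (0:Int) ≤ (j:Int) := by positivity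
    have hj1 : ((j:Int)) < 11 := by exact_mod_cast hjlt
    simp only [pvBStep, hmod]
    by_cases hd : d = 0
    · subst hd
      rw [if_neg (by decide), if_neg (by decide)]
      rw [hbase (j:Int) hj0 hj1]
      congr 1
      rcases hs with rfl | rfl <;> omega
    · rw [if_pos hd, if_pos hd]
      have htgt0 : (0:Int) ≤ ((p + s * d) % 11 + -s * (j:Int)) % 11 := Int.emod_nonneg _ (by norm_num)
      have htgt1 : ((p + s * d) % 11 + -s * (j:Int)) % 11 < 11 := Int.emod_lt_of_pos _ h11
      rw [pyGetD_pySetD_int _ d (j:Int) _ hd0 (by rw [hblen]; exact_mod_cast hd1.trans (by norm_num)) hj0 (by rw [hblen]; exact_mod_cast hj1)]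
      rw [pyGetD_pySetD_int counts p _ _ hp0 (by rw [hk]; exact_mod_cast hp1) htgt0 (by rw [hk]; exact_mod_cast htgt1)]
      by_cases hjd : (j:Int) = d
      · rw [if_pos hjd, if_pos (by rcases hs with rfl | rfl <;> omega)]
        rw [hbase d hd0 (by omega)]
        have : (p + s * ((d - d) % 11)) % 11 = p := by
          rcases hs with rfl | rfl <;> omega
        rw [this]
      · rw [if_neg hjd, if_neg (by rcases hs with rfl | rfl <;> omega)]
        rw [hbase (j:Int) hj0 hj1]
        congr 1
        rcases hs with rfl | rfl <;> omega

-- ans-shift: the running sum in pvStepOld is additive in its start value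
theorem pvStepOld_shift (t : List Char) : ∀ c x, (t.foldl pvStepOld (c, x)).2 = x + (t.foldl pvStepOld (c, 0)).2 := by
  induction t with
  | nil => intro c x; simp
  | cons ch t ih =>
    intro c x
    simp only [List.foldl_cons, pvStepOld, zero_add]
    rw [ih (pvBStep (pvDigitVal ch) c) (x + PySem.List.pyGetD (pvBStep (pvDigitVal ch) c) 0 0),
        ih (pvBStep (pvDigitVal ch) c) (PySem.List.pyGetD (pvBStep (pvDigitVal ch) c) 0 0)]
    ring

theorem pv_bridge (L : List Char) (hL : L.all Char.isDigit = true) :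
    ∀ cur counts p s a, pvInv cur counts p s →
      (L.foldl pvStepB (counts, p, s, a)).2.2.2 = a + (L.foldl pvStepOld (cur, 0)).2 := by
  induction L with
  | nil => intro cur counts p s a _; simp
  | cons ch t ih =>
    intro cur counts p s a hinv
    simp only [List.all_cons, Bool.and_eq_true] at hL
    obtain ⟨hch, ht⟩ := hL
    obtain ⟨hb0, hb1⟩ := pv_digit_bounds ch hch
    have hiff := pv_digit_zero_iff ch hch
    have hif : (if ch ≠ '0' then PySem.List.pySetD counts p (PySem.List.pyGetD counts p 0 + 1) else counts)
        = (if pvDigitVal ch ≠ 0 then PySem.List.pySetD counts p (PySem.List.pyGetD counts p 0 + 1) else counts) := by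
      by_cases h : ch = '0'
      · rw [if_neg (by simp [h]), if_neg (by simpa using (not_iff_not.mpr hiff).mp (by simp [h]))]
      · rw [if_pos h, if_pos (hiff.mp h)]
    have hstep := pv_step_inv cur counts p s (pvDigitVal ch) hinv hb0 hb1
    simp only [List.foldl_cons, pvStepB, pvStepOld]
    rw [hif]
    rw [ih ht _ _ _ _ _ hstep]
    -- head equality: new row's bucket 0 = new counter at new prefix value
    obtain ⟨_, _, hp0', hp1', _, hj'⟩ := hstep
    have h0 := hj' 0 (by norm_num)
    have hmodp : PySem.Int.mod (PySem.Int.mod (p + s * pvDigitVal ch) 11 + -s * ((0:Nat):Int)) 11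
        = PySem.Int.mod (p + s * pvDigitVal ch) 11 := by
      rw [PySem.Int.mod_eq_emod_of_pos (by norm_num : (0:Int) < 11)]
      push_cast
      omega
    rw [hmodp] at h0
    simp only [Nat.cast_zero] at h0
    rw [pvStepOld_shift t (pvBStep (pvDigitVal ch) cur)
          (0 + PySem.List.pyGetD (pvBStep (pvDigitVal ch) cur) 0 0)]
    rw [h0]
    ring

theorem pv_inv_init : pvInv (List.replicate 11 0) (List.replicate 11 0) 0 1 := by
  refine ⟨by simp, by simp, le_refl _, by norm_num, Or.inl rfl, ?_⟩
  decide

theorem alt_eq_sum (s : String) (h : s.toList.all Char.isDigit = true) :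
    count_11_sequences_alt s
    = ((List.range s.toList.length).map (fun k => (pvRows s.toList (k + 1)).getD 0 0)).sum := by
  rw [alt_eq_foldl, pv_bridge s.toList h _ _ _ _ _ pv_inv_init, loopOld, zero_add]

theorem pv_dp0_eq (n : Nat) (z : List Int) :
    (PySem.List.pyRange 0 (n : Int) 1).map (fun _ => z) = List.replicate n z := by
  rw [PySem.List.pyRange_zero_natCast, List.map_map]
  refine List.eq_replicate_iff.mpr ⟨by simp, ?_⟩
  intro b hb
  simp at hb
  exact hb.2.symm

set_option maxHeartbeats 2000000 in
theorem loopA (s : String) (hd : s.toList.all Char.isDigit = true) :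
    ∀ t, t ≤ s.toList.length →
    (PySem.List.pyRange 0 (t : Int) 1).foldl
      (fun dp i =>
        let n : Int := pvDigitVal ((PySem.Str.pyGet? s i).getD ' ')
        PySem.List.pySetD dp i (pvARow (PySem.List.pyGetD dp (i - 1) []) n))
      (List.replicate s.toList.length (List.replicate 11 0))
    = (List.range t).map (fun k => pvRows s.toList (k + 1))
      ++ List.replicate (s.toList.length - t) (List.replicate 11 0) := by
  intro t
  induction t with
  | zero => simp
  | succ t ih =>
    intro ht
    have ht' : t < s.toList.length := by omega
    have hcast : ((t + 1 : Nat) : Int) = (t : Int) + 1 := by push_cast; ring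
    rw [hcast, PySem.List.pyRange_one_succ_right (Int.natCast_nonneg t),
        List.foldl_append, ih (by omega)]
    simp only [List.foldl_cons, List.foldl_nil]
    have hprev : PySem.List.pyGetD
        ((List.range t).map (fun k => pvRows s.toList (k + 1))
          ++ List.replicate (s.toList.length - t) (List.replicate 11 0)) ((t : Int) - 1) []
        = pvRows s.toList t := by
      cases t with
      | zero =>
        have hne : (List.replicate (s.toList.length - 0) (List.replicate (11:Nat) (0:Int))) ≠ [] := by
          simp only [ne_eq, List.replicate_eq_nil_iff]
          omega
        simp only [List.range_zero, List.map_nil, List.nil_append]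
        rw [show ((0 : Nat) : Int) - 1 = -1 by ring,
            PySem.List.pyGetD_neg_one _ ([] : List Int) hne, List.getLast_replicate]
        rfl
      | succ k =>
        have hc : ((k : Nat) + 1 : Int) - 1 = ((k : Nat) : Int) := by ring
        rw [show (((k + 1 : Nat)) : Int) = ((k : Nat) + 1 : Int) by push_cast; ring, hc,
            PySem.List.pyGetD_natCast, List.getD_append, List.getD_eq_getElem?_getD]
        · simp
        · simp
    rw [hprev]
    have hget : (PySem.Str.pyGet? s (t : Int)).getD ' ' = s.toList.getD t ' ' := by
      rw [PySem.Str.pyGet?_natCast, List.getD_eq_getElem?_getD]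
    have hmem : s.toList.getD t ' ' ∈ s.toList := by
      rw [List.getD_eq_getElem?_getD]
      simp only [List.getElem?_eq_getElem ht', Option.getD_some]
      exact List.getElem_mem ht'
    have hdig : (s.toList.getD t ' ').isDigit = true := (List.all_eq_true.mp hd) _ hmem
    obtain ⟨hb0, hb1⟩ := pv_digit_bounds _ hdig
    rw [hget, pv_step_eq _ (pvRows_len _ _) _ hb0 hb1]
    have hstep : pvBStep (pvDigitVal (s.toList.getD t ' ')) (pvRows s.toList t)
        = pvRows s.toList (t + 1) := rfl
    rw [hstep, PySem.List.pySetD_natCast]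
    have hlen : ((List.range t).map (fun k => pvRows s.toList (k + 1))).length = t := by simp
    have hpad : List.replicate (s.toList.length - t) (List.replicate (11:Nat) (0:Int))
        = List.replicate 11 0 :: List.replicate (s.toList.length - (t + 1)) (List.replicate 11 0) := by
      rw [← List.replicate_succ]
      congr 1
      omega
    rw [hpad, List.set_append, hlen]
    simp [List.range_succ]

-- ===== VERDICT =====
theorem count_11_sequences_spec : Claim_equal_count_11_sequences := by
  intro s _ hpre
  unfold Spec_count_11_sequences
  by_cases h0 : s = "0"
  · subst h0; decide
  · show count_11_sequences s = count_11_sequences_alt s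
    unfold count_11_sequences
    simp only [PySem.Str.len_eq]
    rw [if_neg (by simpa using h0)]
    have hz : (PySem.List.pyRange 0 11 1).map (fun _ => (0:Int)) = List.replicate 11 0 := by decide
    rw [hz, pv_dp0_eq, loopA s hpre s.toList.length le_rfl, PySem.List.foldl_add,
        PySem.List.pyRange_zero_natCast, List.map_map, alt_eq_sum s hpre]
    rw [Nat.sub_self, List.replicate_zero, List.append_nil, zero_add]
    apply congrArg
    apply List.map_congr_left
    intro k hk
    have hk' : k < s.toList.length := List.mem_range.mp hk
    have hk2 : k < s.length := by simpa using hk'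
    simp only [Function.comp_apply, PySem.List.pyGetD_natCast, PySem.List.pyGetD_zero]
    simp [List.getD_eq_getElem?_getD, hk2]
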